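-- pv_equiv track=rewrite | github.com/nguyencongtuyenlp/AI-Digest-v2 | source_adapters/facebook_adapter.py | extract_facebook_permalink
-- ===== SOURCE A (Python) =====
-- def normalize_facebook_permalink(url: str) -> str:
--     raw = str(url or "").strip()
--     if not raw:
--         return ""
--     raw = raw.replace("m.facebook.com", "www.facebook.com").replace("mbasic.facebook.com", "www.facebook.com")
--     if "/groups/" in raw and ("/posts/" in raw or "/videos/" in raw):
--         raw = raw.split("?", 1)[0]
--     raw = raw.split("?__cft__=", 1)[0]
--     raw = raw.split("&__cft__=", 1)[0]
--     raw = raw.split("&__tn__=", 1)[0]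
--     raw = raw.split("?__tn__=", 1)[0]
--     return raw
--
-- def extract_facebook_permalink(links: list[str]) -> str:
--     preferred_patterns = (
--         "/posts/",
--         "/groups/",
--         "/permalink.php",
--         "/share/p/",
--         "/videos/",
--     )
--     normalized_links = [normalize_facebook_permalink(link) for link in links if str(link or "").strip()]
--     for pattern in preferred_patterns:
--         for link in normalized_links:
--             if pattern == "/groups/" and "/posts/" not in link:
--                 continue
--             if pattern in link:
--                 return link
--     return normalized_links[0] if normalized_links else ""
-- ===== SOURCE B (Python) =====
-- # B: single-pass minimum-by-priority-score instead of nested pattern/link loops.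
--
-- _PATTERNS = ("/posts/", "/groups/", "/permalink.php", "/share/p/", "/videos/")
--
--
-- def normalize_facebook_permalink(url: str) -> str:
--     raw = str(url or "").strip()
--     if not raw:
--         return ""
--     raw = raw.replace("m.facebook.com", "www.facebook.com").replace("mbasic.facebook.com", "www.facebook.com")
--     if "/groups/" in raw and ("/posts/" in raw or "/videos/" in raw):
--         raw = raw.split("?", 1)[0]
--     raw = raw.split("?__cft__=", 1)[0]
--     raw = raw.split("&__cft__=", 1)[0]
--     raw = raw.split("&__tn__=", 1)[0]
--     raw = raw.split("?__tn__=", 1)[0]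
--     return raw
--
--
-- def _score(link: str) -> int:
--     for i, pattern in enumerate(_PATTERNS):
--         if pattern == "/groups/" and "/posts/" not in link:
--             continue
--         if pattern in link:
--             return i
--     return len(_PATTERNS)
--
--
-- def extract_facebook_permalink(links: list[str]) -> str:
--     normalized_links = [normalize_facebook_permalink(link) for link in links if str(link or "").strip()]
--     if not normalized_links:
--         return ""
--     return min(normalized_links, key=_score)
-- ===== Notes on version B (the rewrite author's own statement) =====
-- stated objective: simpler
-- what changed: Replaced A's nested pattern-then-link loops plus separate empty fallback by a per-link priority score and a single first-wins minimum pass over the normalized links (min with key).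
import Mathlib
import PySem

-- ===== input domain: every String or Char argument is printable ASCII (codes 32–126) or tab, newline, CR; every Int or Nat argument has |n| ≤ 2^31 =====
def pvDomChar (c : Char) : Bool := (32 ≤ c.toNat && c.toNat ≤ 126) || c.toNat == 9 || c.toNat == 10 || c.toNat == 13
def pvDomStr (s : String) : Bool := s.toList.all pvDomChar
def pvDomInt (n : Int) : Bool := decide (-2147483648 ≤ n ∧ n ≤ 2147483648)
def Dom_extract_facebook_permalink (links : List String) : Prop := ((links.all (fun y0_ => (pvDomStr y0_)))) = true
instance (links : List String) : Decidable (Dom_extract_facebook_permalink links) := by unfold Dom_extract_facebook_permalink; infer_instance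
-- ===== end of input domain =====

-- B replaces A's nested pattern/link loops by a per-link score and one first-wins minimum pass (simpler decomposition, same cost).

-- ===== PORT A =====
-- shared helper (identical line in A and B): s.split(sep, 1)[0], sep ≠ ""
def pySplit1Head (s sep : String) : String :=
  (((PySem.Str.splitMax? s sep 1).getD [s]).headD s)

def normalize_facebook_permalink (url : String) : String :=
  let raw := PySem.Str.strip url
  if raw = "" then ""
  else
    let raw := PySem.Str.replace (PySem.Str.replace raw "m.facebook.com" "www.facebook.com") "mbasic.facebook.com" "www.facebook.com"
    let raw := if PySem.Str.isIn "/groups/" raw && (PySem.Str.isIn "/posts/" raw || PySem.Str.isIn "/videos/" raw)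
               then pySplit1Head raw "?" else raw
    let raw := pySplit1Head raw "?__cft__="
    let raw := pySplit1Head raw "&__cft__="
    let raw := pySplit1Head raw "&__tn__="
    let raw := pySplit1Head raw "?__tn__="
    raw

def preferredPatterns : List String :=
  ["/posts/", "/groups/", "/permalink.php", "/share/p/", "/videos/"]

-- inner loop of A: 'for link in normalized_links: … return link'
def findLinkA (pattern : String) : List String → Option String
  | [] => none
  | l :: ls =>
    if pattern == "/groups/" && !(PySem.Str.isIn "/posts/" l) then findLinkA pattern ls
    else if PySem.Str.isIn pattern l then some l
    else findLinkA pattern ls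

-- outer loop of A: 'for pattern in preferred_patterns'
def loopA (links : List String) : List String → Option String
  | [] => none
  | p :: ps =>
    match findLinkA p links with
    | some l => some l
    | none => loopA links ps

def extract_facebook_permalink (links : List String) : String :=
  let normalized := (links.filter (fun l => PySem.Str.strip l ≠ "")).map normalize_facebook_permalink
  match loopA normalized preferredPatterns with
  | some l => l
  | none => normalized.headD ""

-- ===== PORT B =====
-- B's _score: loop over enumerate(_PATTERNS) carrying the index
def scoreGo (link : String) (i : Nat) : List String → Nat
  | [] => i
  | p :: ps =>
    if p == "/groups/" && !(PySem.Str.isIn "/posts/" link) then scoreGo link (i + 1) ps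
    else if PySem.Str.isIn p link then i
    else scoreGo link (i + 1) ps

def scoreB (link : String) : Nat := scoreGo link 0 preferredPatterns

-- min(xs, key=_score): left-to-right fold, strict improvement only (first minimum wins)
def pyMinBy (f : String → Nat) (b : String) (s : Nat) : List String → String
  | [] => b
  | x :: xs => if f x < s then pyMinBy f x (f x) xs else pyMinBy f b s xs

def extract_facebook_permalink_alt (links : List String) : String :=
  let normalized := (links.filter (fun l => PySem.Str.strip l ≠ "")).map normalize_facebook_permalink
  match normalized with
  | [] => ""
  | b :: rest => pyMinBy scoreB b (scoreB b) rest

-- ===== PRECONDITION & SPEC =====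
def Spec_extract_facebook_permalink (links : List String) (out : String) : Prop := out = extract_facebook_permalink_alt links
instance (links : List String) (out : String) : Decidable (Spec_extract_facebook_permalink links out) := by unfold Spec_extract_facebook_permalink; infer_instance

-- ===== CLAIM (what is proved, stated in full; the proofs are below) =====
def Claim_equal_extract_facebook_permalink : Prop := ∀ (links : List String), Dom_extract_facebook_permalink links → Spec_extract_facebook_permalink links (extract_facebook_permalink links)

-- ===== LEMMAS AND PROOFS =====

-- the per-pattern match test both programs apply (skip rule for "/groups/")
def matchesB (p l : String) : Bool :=
  if p == "/groups/" && !(PySem.Str.isIn "/posts/" l) then false else PySem.Str.isIn p l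

-- smallest matching pattern index, |ps| if no pattern matches
def idxOf (ps : List String) (l : String) : Nat :=
  match ps with
  | [] => 0
  | p :: ps => if matchesB p l then 0 else 1 + idxOf ps l

-- running minimum of f over a list, seeded with an initial value
def mfold (f : String → Nat) (init : Nat) (xs : List String) : Nat :=
  xs.foldr (fun x a => min (f x) a) init

theorem natMin_succ (a b : Nat) : min (1 + a) (1 + b) = 1 + min a b := by
  rcases Nat.le_total a b with h | h
  · rw [min_eq_left (by omega), min_eq_left h]
  · rw [min_eq_right (by omega), min_eq_right h]

theorem findLinkA_eq_find? (p : String) (nl : List String) :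
    findLinkA p nl = nl.find? (matchesB p) := by
  induction nl with
  | nil => rfl
  | cons l ls ih =>
    rw [findLinkA]
    by_cases h : (p == "/groups/" && !(PySem.Str.isIn "/posts/" l)) = true
    · have hm : matchesB p l = false := by unfold matchesB; rw [if_pos h]
      rw [if_pos h, List.find?_cons_of_neg (by simp [hm]), ih]
    · have hm : matchesB p l = PySem.Str.isIn p l := by unfold matchesB; rw [if_neg h]
      rw [if_neg h]
      by_cases hin : PySem.Str.isIn p l = true
      · rw [if_pos hin, List.find?_cons_of_pos (by rw [hm]; exact hin)]
      · rw [if_neg hin, List.find?_cons_of_neg (by rw [hm]; exact hin), ih]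

theorem scoreGo_eq (l : String) (i : Nat) (ps : List String) :
    scoreGo l i ps = i + idxOf ps l := by
  induction ps generalizing i with
  | nil => simp [scoreGo, idxOf]
  | cons p ps ih =>
    rw [scoreGo, idxOf]
    by_cases h : (p == "/groups/" && !(PySem.Str.isIn "/posts/" l)) = true
    · have hm : matchesB p l = false := by unfold matchesB; rw [if_pos h]
      rw [if_pos h, hm, ih]; simp; omega
    · have hm : matchesB p l = PySem.Str.isIn p l := by unfold matchesB; rw [if_neg h]
      by_cases hin : PySem.Str.isIn p l = true
      · rw [if_neg h, if_pos hin, hm, hin]; simp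
      · rw [if_neg h, if_neg hin, hm, eq_false_of_ne_true hin, ih]; simp; omega

theorem idxOf_le (ps : List String) (l : String) : idxOf ps l ≤ ps.length := by
  induction ps with
  | nil => simp [idxOf]
  | cons p ps ih =>
    rw [idxOf]
    split
    · simp
    · simp only [List.length_cons]; omega

theorem mfold_le_init (f : String → Nat) (init : Nat) (xs : List String) :
    mfold f init xs ≤ init := by
  induction xs with
  | nil => simp [mfold]
  | cons x xs ih =>
    have h : mfold f init (x :: xs) = min (f x) (mfold f init xs) := rfl
    rw [h]
    exact le_trans (min_le_right _ _) ih

theorem mfold_swap_init (f : String → Nat) (i j : Nat) (xs : List String) :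
    min i (mfold f j xs) = min j (mfold f i xs) := by
  induction xs with
  | nil => simp [mfold, min_comm]
  | cons x xs ih =>
    have h1 : mfold f j (x :: xs) = min (f x) (mfold f j xs) := rfl
    have h2 : mfold f i (x :: xs) = min (f x) (mfold f i xs) := rfl
    rw [h1, h2, min_left_comm, ih, min_left_comm]

theorem find?_ext (p q : String → Bool) (xs : List String)
    (h : ∀ x ∈ xs, p x = q x) : xs.find? p = xs.find? q := by
  induction xs with
  | nil => rfl
  | cons x xs ih =>
    simp only [List.find?]
    rw [h x (List.mem_cons_self), ih (fun y hy => h y (List.mem_cons_of_mem _ hy))]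

-- B-side characterisation: the first-wins min fold returns the first element
-- whose score is ≤ the running minimum of the whole list.
theorem pyMinBy_spec (f : String → Nat) (d : String) (rest : List String) (b : String) :
    pyMinBy f b (f b) rest
      = (((b :: rest).find? (fun l => f l ≤ mfold f (f b) rest)).getD d) := by
  induction rest generalizing b with
  | nil => simp [pyMinBy, mfold, List.find?]
  | cons x rs ih =>
    have hmx : mfold f (f b) (x :: rs) = min (f x) (mfold f (f b) rs) := rfl
    by_cases h : f x < f b
    · have hm : min (f x) (mfold f (f b) rs) = mfold f (f x) rs := by
        rw [mfold_swap_init]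
        exact min_eq_right (le_trans (mfold_le_init f (f x) rs) (le_of_lt h))
      have hle : mfold f (f x) rs ≤ f x := mfold_le_init f (f x) rs
      rw [show pyMinBy f b (f b) (x :: rs) = pyMinBy f x (f x) rs from by rw [pyMinBy, if_pos h]]
      rw [ih x, hmx, hm]
      have hqb : ¬ ((decide (f b ≤ mfold f (f x) rs)) = true) := by
        simp only [decide_eq_true_eq]; omega
      conv_rhs => rw [List.find?_cons_of_neg (p := fun l => decide (f l ≤ mfold f (f x) rs)) (a := b) (l := x :: rs) (by simpa using hqb)]
    · have hble : mfold f (f b) rs ≤ f b := mfold_le_init f (f b) rs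
      have hm : min (f x) (mfold f (f b) rs) = mfold f (f b) rs :=
        min_eq_right (by omega)
      rw [show pyMinBy f b (f b) (x :: rs) = pyMinBy f b (f b) rs from by rw [pyMinBy, if_neg h]]
      rw [ih b, hmx, hm]
      by_cases hb : f b ≤ mfold f (f b) rs
      · rw [List.find?_cons_of_pos (by simpa using hb),
          List.find?_cons_of_pos (by simpa using hb)]
      · have hqx : ¬ ((decide (f x ≤ mfold f (f b) rs)) = true) := by
          simp only [decide_eq_true_eq]; omega
        rw [List.find?_cons_of_neg (by simpa using hb),
          List.find?_cons_of_neg (by simpa using hb),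
          List.find?_cons_of_neg (p := fun l => decide (f l ≤ mfold f (f b) rs)) (a := x) (l := rs) (by simpa using hqx)]

-- A-side characterisation, same shape: scanning patterns outer / links inner
-- returns the first link whose pattern-index is ≤ the minimum index.
theorem loopA_spec (d : String) (ps : List String) (nl : List String) :
    (match loopA nl ps with
     | some l => l
     | none => nl.headD d)
      = ((nl.find? (fun l => idxOf ps l ≤ mfold (idxOf ps) ps.length nl)).getD d) := by
  induction ps generalizing nl with
  | nil =>
    have hloop : loopA nl [] = none := rfl
    cases nl with
    | nil => simp [hloop]
    | cons b rs => simp [hloop, idxOf]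
  | cons p ps ih =>
    simp only [loopA, findLinkA_eq_find?]
    cases hf : nl.find? (matchesB p) with
    | some r =>
      -- some link matches p: the minimum index is 0 and the answer is the first match
      have hr := List.find?_some hf
      have hrm : r ∈ nl := List.mem_of_find?_eq_some hf
      have hz : mfold (idxOf (p :: ps)) (p :: ps).length nl = 0 := by
        have h1 : idxOf (p :: ps) r = 0 := by rw [idxOf, if_pos hr]
        have h2 : mfold (idxOf (p :: ps)) (p :: ps).length nl ≤ 0 := by
          clear hf hr
          induction nl with
          | nil => simp at hrm
          | cons x rs ih2 =>
            have hc : mfold (idxOf (p :: ps)) (p :: ps).length (x :: rs)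
                = min (idxOf (p :: ps) x) (mfold (idxOf (p :: ps)) (p :: ps).length rs) := rfl
            rcases List.mem_cons.mp hrm with h | h
            · subst h
              rw [hc, h1]
              exact le_trans (min_le_left _ _) (le_refl 0)
            · exact le_trans (hc ▸ min_le_right _ _) (ih2 h)
        omega
      rw [hz]
      have hext : nl.find? (fun l => decide (idxOf (p :: ps) l ≤ 0)) = nl.find? (matchesB p) := by
        apply find?_ext
        intro x _
        by_cases hx : matchesB p x = true
        · rw [hx]; simp [idxOf, hx]
        · have hfalse : matchesB p x = false := eq_false_of_ne_true hx
          rw [hfalse]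
          simp [idxOf, hfalse]
      rw [hext, hf]
      rfl
    | none =>
      -- no link matches p: every index shifts by one, reduce to the tail patterns
      have hnone : ∀ x ∈ nl, matchesB p x = false := by
        intro x hx
        have := List.find?_eq_none.mp hf x hx
        simpa using this
      have hshift : ∀ x ∈ nl, idxOf (p :: ps) x = 1 + idxOf ps x := by
        intro x hx; rw [idxOf, hnone x hx]; simp
      have hm : mfold (idxOf (p :: ps)) (p :: ps).length nl
          = 1 + mfold (idxOf ps) ps.length nl := by
        clear hf
        induction nl with
        | nil => simp only [mfold, List.foldr, List.length_cons]; omega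
        | cons x rs ih2 =>
          have hc1 : mfold (idxOf (p :: ps)) (p :: ps).length (x :: rs)
              = min (idxOf (p :: ps) x) (mfold (idxOf (p :: ps)) (p :: ps).length rs) := rfl
          have hc2 : mfold (idxOf ps) ps.length (x :: rs)
              = min (idxOf ps x) (mfold (idxOf ps) ps.length rs) := rfl
          rw [hc1, hc2, hshift x (List.mem_cons_self),
            ih2 (fun y hy => hnone y (List.mem_cons_of_mem _ hy))
                (fun y hy => hshift y (List.mem_cons_of_mem _ hy)),
            natMin_succ]
      rw [ih nl, hm]
      congr 1
      apply find?_ext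
      intro x hx
      rw [hshift x hx]
      by_cases h : idxOf ps x ≤ mfold (idxOf ps) ps.length nl
      · have h2 : 1 + idxOf ps x ≤ 1 + mfold (idxOf ps) ps.length nl := by omega
        simp [h, h2]
      · have h2 : ¬ (1 + idxOf ps x ≤ 1 + mfold (idxOf ps) ps.length nl) := by omega
        simp [h, h2]

theorem mfold_top_absorb (f : String → Nat) (b : String) (rs : List String) (top : Nat)
    (hb : f b ≤ top) :
    mfold f top (b :: rs) = mfold f (f b) rs := by
  rw [show mfold f top (b :: rs) = min (f b) (mfold f top rs) from rfl,
    mfold_swap_init]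
  exact min_eq_right (le_trans (mfold_le_init f (f b) rs) hb)

-- the two search strategies coincide on any link list
theorem key_equiv (nl : List String) :
    (match loopA nl preferredPatterns with
     | some l => l
     | none => nl.headD "")
      = (match nl with
         | [] => ""
         | b :: rest => pyMinBy scoreB b (scoreB b) rest) := by
  cases nl with
  | nil => rfl
  | cons b rest =>
    rw [show (match b :: rest with
              | [] => ""
              | b :: rest => pyMinBy scoreB b (scoreB b) rest) = pyMinBy scoreB b (scoreB b) rest from rfl]
    have hsB : ∀ l, scoreB l = idxOf preferredPatterns l := by
      intro l
      have := scoreGo_eq l 0 preferredPatterns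
      simpa [scoreB] using this
    rw [loopA_spec "" preferredPatterns (b :: rest)]
    rw [pyMinBy_spec scoreB "" rest b]
    have habs : mfold (idxOf preferredPatterns) preferredPatterns.length (b :: rest)
        = mfold (idxOf preferredPatterns) (idxOf preferredPatterns b) rest :=
      mfold_top_absorb _ b rest _ (idxOf_le _ b)
    have hmf : mfold scoreB (scoreB b) rest
        = mfold (idxOf preferredPatterns) (idxOf preferredPatterns b) rest := by
      unfold mfold
      rw [hsB]
      congr 1
      funext x a
      rw [hsB]
    rw [habs]
    congr 1
    apply find?_ext
    intro x _
    rw [hsB, hmf]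

-- ===== VERDICT (by name: the statement is the Claim_ definition above) =====
theorem extract_facebook_permalink_spec : Claim_equal_extract_facebook_permalink := by
  intro links _
  unfold Spec_extract_facebook_permalink extract_facebook_permalink extract_facebook_permalink_alt
  exact key_equiv _
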